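-- pv_equiv track=rewrite | github.com/0xSero/reap-expert-swap | scripts/compact_offload.py | resolve_compact_indices
-- ===== SOURCE A (Python) =====
-- from typing import Iterable
--
-- def normalize_dense_local_to_global(
--     dense_local_to_global: dict[int, int] | None,
--     dense_local_count: int,
-- ) -> dict[int, int]:
--     if dense_local_to_global:
--         return {
--             int(local_idx): int(global_idx)
--             for local_idx, global_idx in dense_local_to_global.items()
--         }
--     return {idx: idx for idx in range(int(dense_local_count))}
--
-- def resolve_compact_indices(
--     dense_local_to_global: dict[int, int] | None,
--     dense_local_count: int,
--     keep_set: Iterable[int],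
-- ) -> tuple[list[int], list[int]]:
--     normalized = normalize_dense_local_to_global(dense_local_to_global, dense_local_count)
--     global_to_local = {int(global_idx): int(local_idx) for local_idx, global_idx in normalized.items()}
--     selected_globals = sorted(int(global_idx) for global_idx in keep_set if int(global_idx) in global_to_local)
--     dense_local_indices = [global_to_local[global_idx] for global_idx in selected_globals]
--     return selected_globals, dense_local_indices
-- ===== SOURCE B (Python) =====
-- def resolve_compact_indices(dense_local_to_global, dense_local_count, keep_set):
--     if dense_local_to_global:
--         inv = {int(g): int(l) for l, g in dense_local_to_global.items()}
--     else:
--         inv = {i: i for i in range(int(dense_local_count))}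
--     counts = {}
--     for x in keep_set:
--         g = int(x)
--         if g in inv:
--             counts[g] = counts.get(g, 0) + 1
--     selected_globals = []
--     dense_local_indices = []
--     for g in sorted(counts):
--         c = counts[g]
--         selected_globals += [g] * c
--         dense_local_indices += [inv[g]] * c
--     return selected_globals, dense_local_indices
-- ===== Notes on version B (the rewrite author's own statement) =====
-- stated objective: alternative
-- what changed: Instead of sorting the full (duplicate-carrying) kept list and then re-looking-up each global in a second pass, B tallies kept globals into a count dict in one pass, sorts only the distinct kept globals, and emits each (global, local) block by repetition.
import Mathlib
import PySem

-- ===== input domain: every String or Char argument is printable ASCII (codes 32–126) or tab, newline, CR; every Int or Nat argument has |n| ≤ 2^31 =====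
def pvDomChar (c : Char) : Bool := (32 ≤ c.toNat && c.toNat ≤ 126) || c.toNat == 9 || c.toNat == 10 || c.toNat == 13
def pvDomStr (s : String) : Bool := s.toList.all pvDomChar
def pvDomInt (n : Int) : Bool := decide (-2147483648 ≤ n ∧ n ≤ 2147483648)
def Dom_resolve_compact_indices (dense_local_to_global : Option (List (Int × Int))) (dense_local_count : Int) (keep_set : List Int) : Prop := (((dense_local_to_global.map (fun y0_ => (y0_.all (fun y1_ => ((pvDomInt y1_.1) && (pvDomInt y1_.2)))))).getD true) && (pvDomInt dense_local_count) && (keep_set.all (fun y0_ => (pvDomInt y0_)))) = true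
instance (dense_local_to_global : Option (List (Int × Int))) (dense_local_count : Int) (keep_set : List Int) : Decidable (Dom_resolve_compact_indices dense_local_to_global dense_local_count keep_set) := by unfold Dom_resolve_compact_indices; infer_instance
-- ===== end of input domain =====

-- B counts how often each kept global occurs (one dict pass), sorts only the DISTINCT kept
-- globals, and emits each (global, local) block by repetition — instead of A's sort of the
-- full duplicated list followed by a second lookup pass.  Objective: alternative algorithm.

-- ===== PORT A =====
-- shared dict-comprehension primitive: a Python dict built from a pair stream (first
-- occurrence fixes the position, the last value for a key wins — exactly CPython's rule).
-- A hashmap index makes evaluation near-linear; pv_dictOfPairs_eq below proves it EQUAL to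
-- the naive PySem.Dict insert fold, and every proof reasons about that fold form.
def pvDictStep (st : List Int × Std.HashMap Int Int) (p : Int × Int) : List Int × Std.HashMap Int Int :=
  if st.2.contains p.1 then (st.1, st.2.insert p.1 p.2) else (p.1 :: st.1, st.2.insert p.1 p.2)

def pvDictOfPairs (q : List (Int × Int)) : PySem.Dict Int Int :=
  let st := q.foldl pvDictStep ([], ∅)
  PySem.Dict.mk (st.1.reverse.map (fun k => (k, st.2.getD k 0)))

-- A's normalize_dense_local_to_global fallback branch: {idx: idx for idx in range(int(dense_local_count))}
def pvRangeDict (n : Int) : PySem.Dict Int Int :=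
  pvDictOfPairs ((PySem.List.pyRange 0 n 1).map (fun i => (i, i)))

def resolve_compact_indices (dense_local_to_global : Option (List (Int × Int))) (dense_local_count : Int) (keep_set : List Int) : List Int × List Int :=
  -- normalized = normalize_dense_local_to_global(...): rebuild the dict entry by entry (int() is identity on int keys/values)
  let normalized : PySem.Dict Int Int :=
    match dense_local_to_global with
    | some m =>
        if m = [] then pvRangeDict dense_local_count
        else pvDictOfPairs (pvDictOfPairs m).items
    | none => pvRangeDict dense_local_count
  -- global_to_local = {int(g): int(l) for l, g in normalized.items()}
  let global_to_local : PySem.Dict Int Int :=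
    pvDictOfPairs (normalized.items.map (fun p => (p.2, p.1)))
  let selected_globals : List Int :=
    PySem.List.sorted (keep_set.filter (fun g => global_to_local.contains g)) (fun x => x) false
  -- Python indexes global_to_local[g]; the filter guarantees the key is present, so getD's default is never used
  let dense_local_indices : List Int := selected_globals.map (fun g => global_to_local.getD g 0)
  (selected_globals, dense_local_indices)

-- ===== PORT B =====
def resolve_compact_indices_alt (dense_local_to_global : Option (List (Int × Int))) (dense_local_count : Int) (keep_set : List Int) : List Int × List Int :=
  -- inv = {int(g): int(l) for l, g in dense_local_to_global.items()}  (or the identity range dict)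
  let inv : PySem.Dict Int Int :=
    match dense_local_to_global with
    | some m =>
        if m = [] then pvRangeDict dense_local_count
        else pvDictOfPairs ((pvDictOfPairs m).items.map (fun p => (p.2, p.1)))
    | none => pvRangeDict dense_local_count
  let counts : PySem.Dict Int Int :=
    keep_set.foldl (fun (c : PySem.Dict Int Int) g => if inv.contains g then c.insert g (c.getD g 0 + 1) else c) PySem.Dict.empty
  -- for g in sorted(counts): emit [g]*c and [inv[g]]*c (inv[g] is present for every counted g)
  (PySem.List.sorted counts.keys (fun x => x) false).foldl
    (fun acc g =>
      (acc.1 ++ List.replicate (counts.getD g 0).toNat g,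
       acc.2 ++ List.replicate (counts.getD g 0).toNat (inv.getD g 0)))
    ([], [])

-- ===== PRECONDITION & SPEC =====
def Spec_resolve_compact_indices (dense_local_to_global : Option (List (Int × Int))) (dense_local_count : Int) (keep_set : List Int) (out : List Int × List Int) : Prop := out = resolve_compact_indices_alt dense_local_to_global dense_local_count keep_set
instance (dense_local_to_global : Option (List (Int × Int))) (dense_local_count : Int) (keep_set : List Int) (out : List Int × List Int) : Decidable (Spec_resolve_compact_indices dense_local_to_global dense_local_count keep_set out) := by unfold Spec_resolve_compact_indices; infer_instance

-- ===== CLAIM (what is proved, stated in full; the proofs are below) =====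
def Claim_equal_resolve_compact_indices : Prop := ∀ (dense_local_to_global : Option (List (Int × Int))) (dense_local_count : Int) (keep_set : List Int), Dom_resolve_compact_indices dense_local_to_global dense_local_count keep_set → Spec_resolve_compact_indices dense_local_to_global dense_local_count keep_set (resolve_compact_indices dense_local_to_global dense_local_count keep_set)

-- ===== LEMMAS AND PROOFS =====

-- the hashmap-indexed dict build is the naive PySem.Dict insert fold
theorem pv_loop_inv (q : List (Int × Int)) (ks : List Int) (h : Std.HashMap Int Int)
    (d : PySem.Dict Int Int)
    (hc : ∀ x : Int, h.contains x = d.contains x)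
    (hi : d.items = ks.reverse.map (fun k => (k, h.getD k 0))) :
    PySem.Dict.mk ((q.foldl pvDictStep (ks, h)).1.reverse.map
      (fun k => (k, (q.foldl pvDictStep (ks, h)).2.getD k 0)))
    = q.foldl (fun d p => d.insert p.1 p.2) d := by
  induction q generalizing ks h d with
  | nil =>
    simp only [List.foldl_nil]
    exact (PySem.Dict.ext hi.symm)
  | cons p q ih =>
    simp only [List.foldl_cons]
    by_cases hcont : h.contains p.1
    · rw [show pvDictStep (ks, h) p = (ks, h.insert p.1 p.2) by simp [pvDictStep, hcont]]
      apply ih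
      · intro x
        rw [Std.HashMap.contains_insert, PySem.Dict.contains_insert]
        rw [hc x, Bool.beq_comm, Bool.or_comm]
      · have hd : d.contains p.1 = true := by rw [← hc]; exact hcont
        show (d.insert p.1 p.2).items = ks.reverse.map (fun k => (k, (h.insert p.1 p.2).getD k 0))
        rw [PySem.Dict.insert, if_pos hd]
        simp only [hi, List.map_map]
        apply List.map_congr_left
        intro k _
        simp only [Function.comp]
        by_cases hk : k = p.1
        · subst hk; simp
        · simp [Std.HashMap.getD_insert, hk, Ne.symm hk, beq_iff_eq]
    · rw [show pvDictStep (ks, h) p = (p.1 :: ks, h.insert p.1 p.2) by simp [pvDictStep, hcont]]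
      have hd : d.contains p.1 = false := by rw [← hc]; simpa using hcont
      have hknot : p.1 ∉ ks := by
        intro hmem
        have hitem : (p.1, h.getD p.1 0) ∈ d.items := by
          rw [hi]; exact List.mem_map.mpr ⟨p.1, by simpa using hmem, rfl⟩
        have : d.contains p.1 = true := by
          unfold PySem.Dict.contains
          exact List.any_eq_true.mpr ⟨_, hitem, by simp⟩
        simp [this] at hd
      apply ih
      · intro x
        rw [Std.HashMap.contains_insert, PySem.Dict.contains_insert]
        rw [hc x, Bool.beq_comm, Bool.or_comm]
      · show (d.insert p.1 p.2).items = (p.1 :: ks).reverse.map (fun k => (k, (h.insert p.1 p.2).getD k 0))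
        rw [PySem.Dict.insert, if_neg (by simp [hd])]
        simp only [List.reverse_cons, List.map_append, hi]
        congr 1
        · apply List.map_congr_left
          intro k hk
          have : k ≠ p.1 := fun he => hknot (he ▸ (List.mem_reverse.mp hk))
          simp [Std.HashMap.getD_insert, Ne.symm this]
        · simp [Std.HashMap.getD_insert]

theorem pv_dictOfPairs_eq (q : List (Int × Int)) :
    pvDictOfPairs q = q.foldl (fun d p => d.insert p.1 p.2) PySem.Dict.empty := by
  unfold pvDictOfPairs
  simp only []
  exact pv_loop_inv q [] ∅ PySem.Dict.empty
    (fun x => by simp [PySem.Dict.contains_empty]) (by simp [PySem.Dict.empty])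

-- rebuilding a dict from its own items reproduces it
theorem pv_refold_items (d : PySem.Dict Int Int) (hnd : d.keys.Nodup) :
    pvDictOfPairs d.items = d := by
  rw [pv_dictOfPairs_eq]
  apply PySem.Dict.ext
  rw [PySem.Dict.items_foldl_insert_fresh d.items Prod.fst Prod.snd PySem.Dict.empty
      (fun a _ => by simp [PySem.Dict.contains_empty]) hnd]
  simp [PySem.Dict.empty]

-- a dict built from pairs has unique keys
theorem pv_nodup_keys_dictOfPairs (q : List (Int × Int)) : (pvDictOfPairs q).keys.Nodup := by
  rw [pv_dictOfPairs_eq]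
  exact PySem.Dict.nodup_keys_foldl_insert_key q Prod.fst (fun _ p => p.2) PySem.Dict.empty
    (by simp [PySem.Dict.empty, PySem.Dict.keys])

-- inverting the identity range dict gives it back
theorem pv_invert_range (n : Int) :
    pvDictOfPairs ((pvRangeDict n).items.map (fun p => (p.2, p.1))) = pvRangeDict n := by
  have h : (pvRangeDict n).items = (PySem.List.pyRange 0 n 1).map (fun i => (i, i)) := by
    unfold pvRangeDict
    rw [pv_dictOfPairs_eq, List.foldl_map]
    rw [PySem.Dict.items_foldl_insert_fresh (PySem.List.pyRange 0 n 1) (fun i => i) (fun i => i)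
        PySem.Dict.empty (fun a _ => by simp [PySem.Dict.contains_empty])
        (by simpa using PySem.List.nodup_pyRange_one 0 n)]
    simp [PySem.Dict.empty]
  rw [h, List.map_map]
  have h2 : ((fun p : Int × Int => (p.2, p.1)) ∘ (fun i : Int => (i, i))) = (fun i : Int => (i, i)) := rfl
  rw [h2, ← h]
  exact pv_refold_items (pvRangeDict n) (by unfold pvRangeDict; exact pv_nodup_keys_dictOfPairs _)

-- the two-list fold over blocks is a pair of flatMaps
theorem pv_pair_foldl (K : List Int) (r1 r2 : Int → List Int) (acc : List Int × List Int) :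
    K.foldl (fun acc g => (acc.1 ++ r1 g, acc.2 ++ r2 g)) acc
      = (acc.1 ++ K.flatMap r1, acc.2 ++ K.flatMap r2) := by
  induction K generalizing acc with
  | nil => simp
  | cons g K ih => simp [List.foldl_cons, ih, List.flatMap_cons]

theorem pv_count_flatMap_replicate (K : List Int) (hnd : K.Nodup) (cnt : Int → Nat) (x : Int) :
    (K.flatMap (fun g => List.replicate (cnt g) g)).count x
      = if x ∈ K then cnt x else 0 := by
  induction K with
  | nil => simp
  | cons g K ih =>
    rw [List.nodup_cons] at hnd
    obtain ⟨hg, hnd⟩ := hnd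
    rw [List.flatMap_cons, List.count_append, ih hnd]
    by_cases hx : x = g
    · subst hx
      simp [hg]
    · simp [List.count_replicate, List.mem_cons, hx, Ne.symm hx]

theorem pv_pairwise_flatMap_replicate (K : List Int) (hp : K.Pairwise (· < ·)) (cnt : Int → Nat) :
    (K.flatMap (fun g => List.replicate (cnt g) g)).Pairwise (· ≤ ·) := by
  induction K with
  | nil => simp
  | cons g K ih =>
    rw [List.pairwise_cons] at hp
    obtain ⟨hg, hp⟩ := hp
    rw [List.flatMap_cons, List.pairwise_append]
    refine ⟨List.pairwise_replicate.mpr (Or.inr le_rfl), ih hp, ?_⟩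
    intro x hx y hy
    obtain ⟨g', hg', hy'⟩ := List.mem_flatMap.mp hy
    rw [List.eq_of_mem_replicate hx, List.eq_of_mem_replicate hy']
    exact le_of_lt (hg g' hg')

-- the generic tail: for ANY global→local dict, B's counting loop produces A's sorted list and its lookups
theorem pv_tail_eq (d : PySem.Dict Int Int) (ks : List Int) :
    (PySem.List.sorted (ks.filter (fun g => d.contains g)) (fun x => x) false,
      (PySem.List.sorted (ks.filter (fun g => d.contains g)) (fun x => x) false).map (fun g => d.getD g 0))
    = (PySem.List.sorted (PySem.Dict.counter (ks.filter (fun g => d.contains g))).keys (fun x => x) false).foldl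
        (fun acc g =>
          (acc.1 ++ List.replicate ((PySem.Dict.counter (ks.filter (fun g => d.contains g))).getD g 0).toNat g,
           acc.2 ++ List.replicate ((PySem.Dict.counter (ks.filter (fun g => d.contains g))).getD g 0).toNat (d.getD g 0)))
        ([], []) := by
  set kept := ks.filter (fun g => d.contains g) with hkept
  set K := PySem.List.sorted (PySem.Set.ofList kept) (fun x => x) false with hK
  have hkeys : (PySem.Dict.counter kept).keys = PySem.Set.ofList kept := PySem.Dict.keys_counter kept
  have hKnd : K.Nodup := (PySem.List.sorted_perm _ _ _).nodup_iff.mpr (PySem.Set.nodup_ofList kept)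
  have hKlt : K.Pairwise (· < ·) := PySem.List.sorted_ofList_pairwise_lt kept
  have hKmem : ∀ x, x ∈ K ↔ x ∈ kept := by
    intro x
    rw [hK, PySem.List.mem_sorted, PySem.Set.mem_ofList]
  have hgetD : ∀ g, ((PySem.Dict.counter kept).getD g 0).toNat = kept.count g := by
    intro g; rw [PySem.Dict.getD_counter]; exact Int.toNat_natCast _
  rw [hkeys, ← hK, pv_pair_foldl]
  have hcnt : ∀ x, (K.flatMap (fun g => List.replicate (((PySem.Dict.counter kept).getD g 0).toNat) g)).count x
      = kept.count x := by
    intro x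
    rw [pv_count_flatMap_replicate K hKnd _ x]
    by_cases hx : x ∈ K
    · simp [hx]
    · rw [if_neg hx, Eq.comm, List.count_eq_zero]
      exact fun h => hx ((hKmem x).mpr h)
  have hperm : (K.flatMap (fun g => List.replicate (((PySem.Dict.counter kept).getD g 0).toNat) g)).Perm kept :=
    List.perm_iff_count.mpr (fun a => hcnt a)
  have hfirst : PySem.List.sorted kept (fun x => x) false
      = K.flatMap (fun g => List.replicate (((PySem.Dict.counter kept).getD g 0).toNat) g) :=
    PySem.List.sorted_id_eq_of_perm_of_pairwise kept _ hperm
      (pv_pairwise_flatMap_replicate K hKlt _)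
  have hsecond : K.flatMap (fun g => List.replicate (((PySem.Dict.counter kept).getD g 0).toNat) (d.getD g 0))
      = (K.flatMap (fun g => List.replicate (((PySem.Dict.counter kept).getD g 0).toNat) g)).map (fun g => d.getD g 0) := by
    rw [List.map_flatMap]
    simp [List.map_replicate]
  rw [hsecond, ← hfirst]
  simp

-- the whole pipeline once both sides talk about the same global→local dict
theorem pv_main (d : PySem.Dict Int Int) (ks : List Int) :
    (PySem.List.sorted (ks.filter (fun g => d.contains g)) (fun x => x) false,
      (PySem.List.sorted (ks.filter (fun g => d.contains g)) (fun x => x) false).map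
        (fun g => d.getD g 0))
    = (PySem.List.sorted
        (ks.foldl (fun (c : PySem.Dict Int Int) g => if d.contains g then c.insert g (c.getD g 0 + 1) else c) PySem.Dict.empty).keys
        (fun x => x) false).foldl
        (fun acc g =>
          (acc.1 ++ List.replicate ((ks.foldl (fun (c : PySem.Dict Int Int) g => if d.contains g then c.insert g (c.getD g 0 + 1) else c) PySem.Dict.empty).getD g 0).toNat g,
           acc.2 ++ List.replicate ((ks.foldl (fun (c : PySem.Dict Int Int) g => if d.contains g then c.insert g (c.getD g 0 + 1) else c) PySem.Dict.empty).getD g 0).toNat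
             (d.getD g 0)))
        ([], []) := by
  have hcounts : ks.foldl (fun (c : PySem.Dict Int Int) g => if d.contains g then c.insert g (c.getD g 0 + 1) else c) PySem.Dict.empty
      = PySem.Dict.counter (ks.filter (fun g => d.contains g)) := by
    rw [← PySem.Dict.foldl_insert_getD_add_one_eq_counter, List.foldl_filter]
  rw [hcounts]
  exact pv_tail_eq d ks

-- ===== VERDICT (by name: the statement is the Claim_ definition above) =====
set_option maxHeartbeats 1000000 in
theorem resolve_compact_indices_spec : Claim_equal_resolve_compact_indices := by
  intro dg n ks _
  unfold Spec_resolve_compact_indices resolve_compact_indices resolve_compact_indices_alt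
  cases dg with
  | none =>
    simp only []
    rw [pv_invert_range n]
    exact pv_main (pvRangeDict n) ks
  | some m =>
    by_cases hm : m = []
    · simp only [if_pos hm]
      rw [pv_invert_range n]
      exact pv_main (pvRangeDict n) ks
    · simp only [if_neg hm]
      rw [pv_refold_items (pvDictOfPairs m) (pv_nodup_keys_dictOfPairs m)]
      exact pv_main (pvDictOfPairs ((pvDictOfPairs m).items.map (fun p => (p.2, p.1)))) ks
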